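-- pv_equiv track=rewrite | github.com/tarkadaal/aoc2018 | day2/pt1.py | solve
-- ===== SOURCE A (Python) =====
-- def count_chars(data):
--     result = {}
--     for char in data:
--         if char not in result:
--             result[char] = 0
--         result[char] = result[char] + 1
--     return result
--
-- def has_two_matching(results):
--     return 2 in results.values()
--
-- def has_three_matching(results):
--     return 3 in results.values()
--
-- def solve(data):
--     total_two = 0
--     total_three = 0
--     for line in data:
--         counts = count_chars(line)
--         if has_two_matching(counts):
--             total_two += 1
--         if has_three_matching(counts):
--             total_three += 1
--     return total_three * total_two
-- ===== SOURCE B (Python) =====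
-- def run_lengths(s):
--     if not s:
--         return []
--     n = 1
--     while n < len(s) and s[n] == s[0]:
--         n += 1
--     return [n] + run_lengths(s[n:])
--
--
-- def solve(data):
--     total_two = 0
--     total_three = 0
--     for line in data:
--         runs = run_lengths(sorted(line))
--         if 2 in runs:
--             total_two += 1
--         if 3 in runs:
--             total_three += 1
--     return total_three * total_two
-- ===== Notes on version B (the rewrite author's own statement) =====
-- stated objective: alternative
-- what changed: replaces the per-line hash-table character counting (dict build + membership scan of its values) by sorting each line and scanning it into run lengths, testing whether 2 or 3 occurs among the runs
import Mathlib
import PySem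

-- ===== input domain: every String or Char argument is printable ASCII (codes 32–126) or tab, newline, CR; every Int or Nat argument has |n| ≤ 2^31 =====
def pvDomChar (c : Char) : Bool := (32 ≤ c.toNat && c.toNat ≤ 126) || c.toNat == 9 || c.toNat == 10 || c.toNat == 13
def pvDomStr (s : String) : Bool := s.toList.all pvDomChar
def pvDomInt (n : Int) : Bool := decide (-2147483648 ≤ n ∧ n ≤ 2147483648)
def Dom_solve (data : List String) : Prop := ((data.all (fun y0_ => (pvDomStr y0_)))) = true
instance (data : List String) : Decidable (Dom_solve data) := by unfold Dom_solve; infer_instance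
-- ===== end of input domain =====

-- B replaces A's per-line hash-table character counting by a sort-then-run-length scan; same cost class, different traversal.

-- ===== PORT A =====
def count_chars (data : String) : PySem.Dict Char Int :=
  data.toList.foldl (fun result char =>
    let result := if result.contains char then result else result.insert char 0
    result.insert char (result.getD char 0 + 1)) PySem.Dict.empty

def has_two_matching (results : PySem.Dict Char Int) : Bool := results.values.contains 2

def has_three_matching (results : PySem.Dict Char Int) : Bool := results.values.contains 3

def solve (data : List String) : Int :=
  let p := data.foldl (fun (acc : Int × Int) line =>
    let counts := count_chars line
    let acc1 := if has_two_matching counts then acc.1 + 1 else acc.1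
    let acc2 := if has_three_matching counts then acc.2 + 1 else acc.2
    (acc1, acc2)) (0, 0)
  p.2 * p.1

-- ===== PORT B =====
-- run_lengths: the inner while-loop counts the equal-prefix (takeWhile) and the
-- recursive call continues on the rest of the list (dropWhile), exactly as s[n:].
def run_lengths (s : List Char) : List Int :=
  match s with
  | [] => []
  | c :: rest =>
    (((rest.takeWhile (· == c)).length : Int) + 1) :: run_lengths (rest.dropWhile (· == c))
termination_by s.length
decreasing_by
  have := List.length_dropWhile_le (· == c) rest
  simp only [List.length_cons]
  omega

def solve_alt (data : List String) : Int :=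
  let p := data.foldl (fun (acc : Int × Int) line =>
    let runs := run_lengths (PySem.List.sorted line.toList (fun x => x) false)
    (if runs.contains 2 then acc.1 + 1 else acc.1,
     if runs.contains 3 then acc.2 + 1 else acc.2)) (0, 0)
  p.2 * p.1

-- ===== PRECONDITION & SPEC =====
def Spec_solve (data : List String) (out : Int) : Prop := out = solve_alt data
instance (data : List String) (out : Int) : Decidable (Spec_solve data out) := by unfold Spec_solve; infer_instance

-- ===== CLAIM (what is proved, stated in full; the proofs are below) =====
def Claim_equal_solve : Prop := ∀ (data : List String), Dom_solve data → Spec_solve data (solve data)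

-- ===== LEMMAS AND PROOFS =====

-- A's loop body is exactly the Counter step d.modify char 0 (· + 1).
lemma count_step_eq (d : PySem.Dict Char Int) (k : Char) :
    (let r := if d.contains k then d else d.insert k 0
     r.insert k (r.getD k 0 + 1)) = d.modify k 0 (· + 1) := by
  by_cases h : d.contains k = true
  · simp only [h, if_true, PySem.Dict.modify]
  · have h0 : d.contains k = false := eq_false_of_ne_true h
    have h' : ∀ p ∈ d.items, p.1 ≠ k := by
      simp only [PySem.Dict.contains, List.any_eq_false, beq_iff_eq] at h0
      exact fun p hp => h0 p hp
    have hany : (d.items.any fun p => p.1 == k) = false := by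
      simp only [List.any_eq_false]; exact fun p hp => by simp [h' p hp]
    have hfind : d.items.find? (fun p => p.1 == k) = none := by
      simp only [List.find?_eq_none]; exact fun p hp => by simp [h' p hp]
    have hmap : List.map (fun p => if p.1 = k then (k, (1:Int)) else p) d.items = d.items := by
      rw [List.map_congr_left (fun p hp => if_neg (h' p hp))]; exact List.map_id' _
    simp only [PySem.Dict.modify, PySem.Dict.insert,
      PySem.Dict.contains, PySem.Dict.getD, PySem.Dict.get?]
    simp [hany, hfind, List.find?_append, hmap]

lemma count_chars_eq_counter (s : String) :
    count_chars s = PySem.Dict.counter s.toList := by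
  rw [PySem.Dict.counter_eq_foldl, count_chars]
  have hf : (fun (result : PySem.Dict Char Int) (char : Char) =>
      let result := if result.contains char then result else result.insert char 0
      result.insert char (result.getD char 0 + 1))
      = (fun (d : PySem.Dict Char Int) (x : Char) => d.modify x 0 (· + 1)) :=
    funext fun d => funext fun k => count_step_eq d k
  rw [hf]

-- membership of k among the values of Counter(cs)
lemma mem_values_counter (cs : List Char) (k : Int) :
    ((PySem.Dict.counter cs).values.contains k = true) ↔ ∃ c ∈ cs, (cs.count c : Int) = k := by
  simp only [List.contains_eq_mem, decide_eq_true_eq, PySem.Dict.values,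
    PySem.Dict.items_counter, List.map_map, List.mem_map, Function.comp]
  constructor
  · rintro ⟨c, hc, rfl⟩
    exact ⟨c, (PySem.Set.mem_ofList cs c).1 hc, rfl⟩
  · rintro ⟨c, hc, rfl⟩
    exact ⟨c, (PySem.Set.mem_ofList cs c).2 hc, rfl⟩

-- in a weakly increasing list the element the run starts with does not recur after the run
lemma not_mem_dropWhile_beq (c : Char) (rest : List Char)
    (hc : ∀ y ∈ rest, c ≤ y) (hp : rest.Pairwise (· ≤ ·)) :
    c ∉ rest.dropWhile (· == c) := by
  induction rest with
  | nil => simp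
  | cons h tl ih =>
    rcases List.pairwise_cons.1 hp with ⟨hh, htl⟩
    rw [List.dropWhile_cons]
    by_cases hhc : (h == c) = true
    · rw [if_pos hhc]
      exact ih (fun y hy => hc y (List.mem_cons_of_mem _ hy)) htl
    · rw [if_neg hhc]
      have hne : h ≠ c := by simpa using hhc
      have hlt : c < h := lt_of_le_of_ne (hc h List.mem_cons_self) (Ne.symm hne)
      intro hm
      rcases List.mem_cons.1 hm with rfl | hm'
      · exact hne rfl
      · exact absurd (hh c hm') (not_le.2 hlt)

-- in a weakly increasing list, the run lengths are exactly the multiplicities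
lemma mem_run_lengths (l : List Char) (hl : l.Pairwise (· ≤ ·)) (k : Int) :
    ((run_lengths l).contains k = true) ↔ ∃ c ∈ l, (l.count c : Int) = k := by
  induction l using run_lengths.induct with
  | case1 => simp [run_lengths]
  | case2 c rest ih =>
    rcases List.pairwise_cons.1 hl with ⟨hc, hrest⟩
    rw [run_lengths]
    simp only [List.contains_cons, Bool.or_eq_true, beq_iff_eq]
    set t := rest.takeWhile (· == c) with ht
    set dr := rest.dropWhile (· == c) with hdr
    have hsplit : t ++ dr = rest := List.takeWhile_append_dropWhile
    have htc : ∀ x ∈ t, x = c := by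
      intro x hx
      rw [ht] at hx
      exact eq_of_beq (List.mem_takeWhile_imp (p := fun y => y == c) hx)
    have hdrpw : dr.Pairwise (· ≤ ·) := hrest.sublist (List.dropWhile_sublist _)
    have hcdr : c ∉ dr := not_mem_dropWhile_beq c rest hc hrest
    have hcountc : (c :: rest).count c = t.length + 1 := by
      have h1 : t.count c = t.length := List.count_eq_length.2 (fun b hb => by simp [htc b hb])
      have h2 : dr.count c = 0 := List.count_eq_zero.2 hcdr
      rw [List.count_cons_self, ← hsplit, List.count_append, h1, h2]
    have hcountdr : ∀ x ∈ dr, (c :: rest).count x = dr.count x := by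
      intro x hx
      have hxc : x ≠ c := fun e => hcdr (e ▸ hx)
      have h1 : t.count x = 0 := List.count_eq_zero.2 (fun hm => hxc (htc x hm))
      have hcx : c ≠ x := Ne.symm hxc
      rw [← hsplit]
      simp [List.count_append, h1, hcx]
    constructor
    · rintro (rfl | hmem)
      · exact ⟨c, List.mem_cons_self, by rw [hcountc]; push_cast; ring⟩
      · rcases (ih hdrpw).1 hmem with ⟨x, hx, hcnt⟩
        refine ⟨x, ?_, by rw [hcountdr x hx]; exact hcnt⟩
        exact List.mem_cons_of_mem _ (by rw [← hsplit]; exact List.mem_append_right _ hx)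
    · rintro ⟨x, hx, hcnt⟩
      rcases List.mem_cons.1 hx with rfl | hx'
      · left; rw [hcountc] at hcnt; push_cast at hcnt ⊢; omega
      · rcases List.mem_append.1 (by rw [hsplit]; exact hx') with hxt | hxd
        · left
          have hxc := htc x hxt; subst hxc
          rw [hcountc] at hcnt; push_cast at hcnt ⊢; omega
        · right
          exact (ih hdrpw).2 ⟨x, hxd, by rw [← hcountdr x hxd]; exact hcnt⟩

-- per line: A's values test equals B's run-length test
lemma line_eq (line : String) (k : Int) :
    (count_chars line).values.contains k
      = (run_lengths (PySem.List.sorted line.toList (fun x => x) false)).contains k := by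
  set l := PySem.List.sorted line.toList (fun x => x) false with hldef
  have hperm : l.Perm line.toList := PySem.List.sorted_perm _ _ _
  have hpw : l.Pairwise (· ≤ ·) := PySem.List.sorted_pairwise _ _
  rw [count_chars_eq_counter]
  have h1 := mem_values_counter line.toList k
  have h2 := mem_run_lengths l hpw k
  have h3 : (∃ c ∈ line.toList, (line.toList.count c : Int) = k) ↔
      (∃ c ∈ l, (l.count c : Int) = k) := by
    constructor
    · rintro ⟨c, hc, rfl⟩; exact ⟨c, hperm.mem_iff.2 hc, by rw [hperm.count_eq]⟩
    · rintro ⟨c, hc, rfl⟩; exact ⟨c, hperm.mem_iff.1 hc, by rw [hperm.count_eq]⟩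
  rw [Bool.eq_iff_iff, h1, h2, h3]

-- ===== VERDICT (by name: the statement is the Claim_ definition above) =====
theorem solve_spec : Claim_equal_solve := by
  intro data _
  unfold Spec_solve solve solve_alt
  have hstep : (fun (acc : Int × Int) line =>
      let counts := count_chars line
      let acc1 := if has_two_matching counts then acc.1 + 1 else acc.1
      let acc2 := if has_three_matching counts then acc.2 + 1 else acc.2
      (acc1, acc2)) = (fun (acc : Int × Int) line =>
      let runs := run_lengths (PySem.List.sorted line.toList (fun x => x) false)
      (if runs.contains 2 then acc.1 + 1 else acc.1,
       if runs.contains 3 then acc.2 + 1 else acc.2)) := by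
    funext acc line
    simp only [has_two_matching, has_three_matching, line_eq line 2, line_eq line 3]
  rw [hstep]
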